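-- pv_equiv track=rewrite | github.com/dancivitarese/coleta_capes | lib_aux.py | calcular_estrato_final
-- ===== SOURCE A (Python) =====
-- from typing import Optional
--
-- def calcular_estrato_final(
--     estrato_h5: Optional[str],
--     estrato_percentil: Optional[str],
--     estrato_jif: Optional[str],
-- ) -> str:
--     """
--     Calcula o estrato final de uma revista usando a MELHOR métrica disponível.
--
--     Regra CAPES: Considerar o maior percentil entre CiteScore e JIF.
--     Para implementação: A1 > A2 > ... > A8 (menor valor = melhor estrato).
--
--     Args:
--         estrato_h5: Estrato baseado em H5-index (ex: "A1", "A2", "N/A")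
--         estrato_percentil: Estrato baseado em CiteScore percentil
--         estrato_jif: Estrato baseado em JIF percentil
--
--     Returns:
--         Melhor estrato entre as três métricas, ou "N/A" se nenhuma disponível
--
--     Examples:
--         >>> calcular_estrato_final("A2", "A1", "A3")
--         "A1"
--         >>> calcular_estrato_final("A5", None, None)
--         "A5"
--         >>> calcular_estrato_final(None, None, None)
--         "N/A"
--     """
--     # Mapear estratos para valores numéricos (menor = melhor)
--     estrato_map = {
--         "A1": 1,
--         "A2": 2,
--         "A3": 3,
--         "A4": 4,
--         "A5": 5,
--         "A6": 6,
--         "A7": 7,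
--         "A8": 8,
--         "N/A": 999,
--         "N/C": 999,
--         None: 999,
--     }
--
--     # Converter estratos para números
--     valores = [
--         (estrato_h5, estrato_map.get(estrato_h5, 999)),
--         (estrato_percentil, estrato_map.get(estrato_percentil, 999)),
--         (estrato_jif, estrato_map.get(estrato_jif, 999)),
--     ]
--
--     # Filtrar valores válidos e pegar o melhor (menor número)
--     valores_validos = [(e, v) for e, v in valores if v < 999]
--
--     if not valores_validos:
--         return "N/A"
--
--     # Retorna o estrato com menor valor numérico (melhor)
--     melhor_estrato, _ = min(valores_validos, key=lambda x: x[1])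
--     return melhor_estrato
-- ===== SOURCE B (Python) =====
-- def calcular_estrato_final(estrato_h5, estrato_percentil, estrato_jif):
--     presentes = {estrato_h5, estrato_percentil, estrato_jif}
--     for label in ("A1", "A2", "A3", "A4", "A5", "A6", "A7", "A8"):
--         if label in presentes:
--             return label
--     return "N/A"
-- ===== Notes on version B (the rewrite author's own statement) =====
-- stated objective: simpler
-- what changed: Instead of mapping each input to a numeric score, filtering and taking min with a key, B scans the ranked labels A1..A8 best-first and returns the first one present among the three inputs (N/A if none).
import Mathlib
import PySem

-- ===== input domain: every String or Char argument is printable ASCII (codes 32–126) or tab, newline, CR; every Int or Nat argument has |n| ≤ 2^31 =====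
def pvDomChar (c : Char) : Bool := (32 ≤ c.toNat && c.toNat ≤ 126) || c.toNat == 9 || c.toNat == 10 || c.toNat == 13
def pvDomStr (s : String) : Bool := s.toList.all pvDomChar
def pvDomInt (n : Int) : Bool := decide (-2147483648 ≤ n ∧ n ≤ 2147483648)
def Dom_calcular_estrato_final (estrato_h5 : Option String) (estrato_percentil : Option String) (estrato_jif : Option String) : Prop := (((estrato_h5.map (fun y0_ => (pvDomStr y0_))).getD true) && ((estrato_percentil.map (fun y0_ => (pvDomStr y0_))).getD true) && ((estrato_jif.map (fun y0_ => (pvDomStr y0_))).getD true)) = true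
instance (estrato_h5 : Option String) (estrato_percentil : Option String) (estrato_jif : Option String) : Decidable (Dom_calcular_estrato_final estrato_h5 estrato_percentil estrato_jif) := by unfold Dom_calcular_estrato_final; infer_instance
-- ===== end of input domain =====

-- B replaces A's score-map + filter + min-by-key with a best-first scan of the ranked labels (objective: simpler).

-- ===== PORT A =====
def estrato_map : PySem.Dict (Option String) Int :=
  PySem.Dict.ofList
    [(some "A1", 1), (some "A2", 2), (some "A3", 3), (some "A4", 4),
     (some "A5", 5), (some "A6", 6), (some "A7", 7), (some "A8", 8),
     (some "N/A", 999), (some "N/C", 999), (none, 999)]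

def calcular_estrato_final (estrato_h5 : Option String) (estrato_percentil : Option String) (estrato_jif : Option String) : String :=
  let valores : List (Option String × Int) :=
    [(estrato_h5, estrato_map.getD estrato_h5 999),
     (estrato_percentil, estrato_map.getD estrato_percentil 999),
     (estrato_jif, estrato_map.getD estrato_jif 999)]
  let valores_validos := valores.filter (fun p => p.2 < 999)
  if valores_validos.isEmpty then "N/A"
  else
    match PySem.List.min? valores_validos (fun x => x.2) with
    | some (some s, _) => s
    | _ => "N/A"  -- unreachable: every pair kept by the filter has value < 999, hence a `some` key

-- ===== PORT B =====
def rankedLabels : List String := ["A1", "A2", "A3", "A4", "A5", "A6", "A7", "A8"]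

def calcular_estrato_final_alt (estrato_h5 : Option String) (estrato_percentil : Option String) (estrato_jif : Option String) : String :=
  -- presentes = {estrato_h5, estrato_percentil, estrato_jif}; return the first ranked label present in it
  let presentes : PySem.Set (Option String) := PySem.Set.ofList [estrato_h5, estrato_percentil, estrato_jif]
  match rankedLabels.find? (fun l => presentes.contains (some l)) with
  | some l => l
  | none => "N/A"

-- ===== PRECONDITION & SPEC =====
def Spec_calcular_estrato_final (estrato_h5 : Option String) (estrato_percentil : Option String) (estrato_jif : Option String) (out : String) : Prop := out = calcular_estrato_final_alt estrato_h5 estrato_percentil estrato_jif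
instance (estrato_h5 : Option String) (estrato_percentil : Option String) (estrato_jif : Option String) (out : String) : Decidable (Spec_calcular_estrato_final estrato_h5 estrato_percentil estrato_jif out) := by unfold Spec_calcular_estrato_final; infer_instance

-- ===== CLAIM (what is proved, stated in full; the proofs are below) =====
def Claim_equal_calcular_estrato_final : Prop := ∀ (estrato_h5 : Option String) (estrato_percentil : Option String) (estrato_jif : Option String), Dom_calcular_estrato_final estrato_h5 estrato_percentil estrato_jif → Spec_calcular_estrato_final estrato_h5 estrato_percentil estrato_jif (calcular_estrato_final estrato_h5 estrato_percentil estrato_jif)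

-- ===== LEMMAS AND PROOFS =====

-- Normalisation: an argument that is none of the eight valid labels behaves, in both programs,
-- exactly like `none`; `nrm` sends it there, and valid labels stay fixed.
def nrm (e : Option String) : Option String :=
  if e = some "A1" ∨ e = some "A2" ∨ e = some "A3" ∨ e = some "A4" ∨
     e = some "A5" ∨ e = some "A6" ∨ e = some "A7" ∨ e = some "A8" then e else none

lemma classify (e : Option String) :
    e = some "A1" ∨ e = some "A2" ∨ e = some "A3" ∨ e = some "A4" ∨
    e = some "A5" ∨ e = some "A6" ∨ e = some "A7" ∨ e = some "A8" ∨
    (estrato_map.getD e 999 = 999 ∧ nrm e = none ∧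
      e ≠ some "A1" ∧ e ≠ some "A2" ∧ e ≠ some "A3" ∧ e ≠ some "A4" ∧
      e ≠ some "A5" ∧ e ≠ some "A6" ∧ e ≠ some "A7" ∧ e ≠ some "A8") := by
  by_cases h1 : e = some "A1"; · exact Or.inl h1
  by_cases h2 : e = some "A2"; · exact Or.inr (Or.inl h2)
  by_cases h3 : e = some "A3"; · exact Or.inr (Or.inr (Or.inl h3))
  by_cases h4 : e = some "A4"; · exact Or.inr (Or.inr (Or.inr (Or.inl h4)))
  by_cases h5 : e = some "A5"; · exact Or.inr (Or.inr (Or.inr (Or.inr (Or.inl h5))))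
  by_cases h6 : e = some "A6"; · exact Or.inr (Or.inr (Or.inr (Or.inr (Or.inr (Or.inl h6)))))
  by_cases h7 : e = some "A7"; · exact Or.inr (Or.inr (Or.inr (Or.inr (Or.inr (Or.inr (Or.inl h7))))))
  by_cases h8 : e = some "A8"; · exact Or.inr (Or.inr (Or.inr (Or.inr (Or.inr (Or.inr (Or.inr (Or.inl h8)))))))
  refine Or.inr (Or.inr (Or.inr (Or.inr (Or.inr (Or.inr (Or.inr (Or.inr ⟨?_, ?_, h1, h2, h3, h4, h5, h6, h7, h8⟩)))))))
  · by_cases hna : e = some "N/A"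
    · subst hna; decide
    by_cases hnc : e = some "N/C"
    · subst hnc; decide
    cases e with
    | none => decide
    | some s =>
      simp only [Option.some.injEq] at h1 h2 h3 h4 h5 h6 h7 h8 hna hnc
      have n1 : ("A1" == s) = false := beq_eq_false_iff_ne.mpr (Ne.symm h1)
      have n2 : ("A2" == s) = false := beq_eq_false_iff_ne.mpr (Ne.symm h2)
      have n3 : ("A3" == s) = false := beq_eq_false_iff_ne.mpr (Ne.symm h3)
      have n4 : ("A4" == s) = false := beq_eq_false_iff_ne.mpr (Ne.symm h4)
      have n5 : ("A5" == s) = false := beq_eq_false_iff_ne.mpr (Ne.symm h5)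
      have n6 : ("A6" == s) = false := beq_eq_false_iff_ne.mpr (Ne.symm h6)
      have n7 : ("A7" == s) = false := beq_eq_false_iff_ne.mpr (Ne.symm h7)
      have n8 : ("A8" == s) = false := beq_eq_false_iff_ne.mpr (Ne.symm h8)
      have na : ("N/A" == s) = false := beq_eq_false_iff_ne.mpr (Ne.symm hna)
      have nc : ("N/C" == s) = false := beq_eq_false_iff_ne.mpr (Ne.symm hnc)
      simp [estrato_map, PySem.Dict.getD, PySem.Dict.ofList, PySem.Dict.update, PySem.Dict.insert,
        PySem.Dict.contains, PySem.Dict.get?, PySem.Dict.empty, List.find?,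
        n1, n2, n3, n4, n5, n6, n7, n8, na, nc]
  · simp [nrm, h1, h2, h3, h4, h5, h6, h7, h8]

lemma getD_none : estrato_map.getD none 999 = 999 := by decide

lemma contains_ofList (l : List (Option String)) (x : Option String) :
    PySem.Set.contains (PySem.Set.ofList l) x = l.contains x := by
  rw [Bool.eq_iff_iff]
  simp [PySem.Set.mem_ofList]

-- A is insensitive to replacing an argument by its normalisation (each position separately).
lemma A_nrm1 (e1 e2 e3 : Option String) :
    calcular_estrato_final e1 e2 e3 = calcular_estrato_final (nrm e1) e2 e3 := by
  rcases classify e1 with h|h|h|h|h|h|h|h|h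
  all_goals first
    | (rw [h]; simp only [nrm]; norm_num)
    | (obtain ⟨hv, hn, -⟩ := h; rw [hn]; simp [calcular_estrato_final, hv, getD_none, List.filter_cons])

lemma A_nrm2 (e1 e2 e3 : Option String) :
    calcular_estrato_final e1 e2 e3 = calcular_estrato_final e1 (nrm e2) e3 := by
  rcases classify e2 with h|h|h|h|h|h|h|h|h
  all_goals first
    | (rw [h]; simp only [nrm]; norm_num)
    | (obtain ⟨hv, hn, -⟩ := h; rw [hn]; simp [calcular_estrato_final, hv, getD_none, List.filter_cons])

lemma A_nrm3 (e1 e2 e3 : Option String) :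
    calcular_estrato_final e1 e2 e3 = calcular_estrato_final e1 e2 (nrm e3) := by
  rcases classify e3 with h|h|h|h|h|h|h|h|h
  all_goals first
    | (rw [h]; simp only [nrm]; norm_num)
    | (obtain ⟨hv, hn, -⟩ := h; rw [hn]; simp [calcular_estrato_final, hv, getD_none, List.filter_cons])

-- So is B.
lemma B_nrm1 (e1 e2 e3 : Option String) :
    calcular_estrato_final_alt e1 e2 e3 = calcular_estrato_final_alt (nrm e1) e2 e3 := by
  rcases classify e1 with h|h|h|h|h|h|h|h|h
  all_goals first
    | (rw [h]; simp only [nrm]; norm_num)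
    | (obtain ⟨-, hn, n1, n2, n3, n4, n5, n6, n7, n8⟩ := h
       rw [hn]
       have b1 : (some "A1" == e1) = false := beq_eq_false_iff_ne.mpr (Ne.symm n1)
       have b2 : (some "A2" == e1) = false := beq_eq_false_iff_ne.mpr (Ne.symm n2)
       have b3 : (some "A3" == e1) = false := beq_eq_false_iff_ne.mpr (Ne.symm n3)
       have b4 : (some "A4" == e1) = false := beq_eq_false_iff_ne.mpr (Ne.symm n4)
       have b5 : (some "A5" == e1) = false := beq_eq_false_iff_ne.mpr (Ne.symm n5)
       have b6 : (some "A6" == e1) = false := beq_eq_false_iff_ne.mpr (Ne.symm n6)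
       have b7 : (some "A7" == e1) = false := beq_eq_false_iff_ne.mpr (Ne.symm n7)
       have b8 : (some "A8" == e1) = false := beq_eq_false_iff_ne.mpr (Ne.symm n8)
       simp only [calcular_estrato_final_alt, rankedLabels, contains_ofList]
       simp [List.find?, List.contains, List.elem, b1, b2, b3, b4, b5, b6, b7, b8])

lemma B_nrm2 (e1 e2 e3 : Option String) :
    calcular_estrato_final_alt e1 e2 e3 = calcular_estrato_final_alt e1 (nrm e2) e3 := by
  rcases classify e2 with h|h|h|h|h|h|h|h|h
  all_goals first
    | (rw [h]; simp only [nrm]; norm_num)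
    | (obtain ⟨-, hn, n1, n2, n3, n4, n5, n6, n7, n8⟩ := h
       rw [hn]
       have b1 : (some "A1" == e2) = false := beq_eq_false_iff_ne.mpr (Ne.symm n1)
       have b2 : (some "A2" == e2) = false := beq_eq_false_iff_ne.mpr (Ne.symm n2)
       have b3 : (some "A3" == e2) = false := beq_eq_false_iff_ne.mpr (Ne.symm n3)
       have b4 : (some "A4" == e2) = false := beq_eq_false_iff_ne.mpr (Ne.symm n4)
       have b5 : (some "A5" == e2) = false := beq_eq_false_iff_ne.mpr (Ne.symm n5)
       have b6 : (some "A6" == e2) = false := beq_eq_false_iff_ne.mpr (Ne.symm n6)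
       have b7 : (some "A7" == e2) = false := beq_eq_false_iff_ne.mpr (Ne.symm n7)
       have b8 : (some "A8" == e2) = false := beq_eq_false_iff_ne.mpr (Ne.symm n8)
       simp only [calcular_estrato_final_alt, rankedLabels, contains_ofList]
       simp [List.find?, List.contains, List.elem, b1, b2, b3, b4, b5, b6, b7, b8])

lemma B_nrm3 (e1 e2 e3 : Option String) :
    calcular_estrato_final_alt e1 e2 e3 = calcular_estrato_final_alt e1 e2 (nrm e3) := by
  rcases classify e3 with h|h|h|h|h|h|h|h|h
  all_goals first
    | (rw [h]; simp only [nrm]; norm_num)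
    | (obtain ⟨-, hn, n1, n2, n3, n4, n5, n6, n7, n8⟩ := h
       rw [hn]
       have b1 : (some "A1" == e3) = false := beq_eq_false_iff_ne.mpr (Ne.symm n1)
       have b2 : (some "A2" == e3) = false := beq_eq_false_iff_ne.mpr (Ne.symm n2)
       have b3 : (some "A3" == e3) = false := beq_eq_false_iff_ne.mpr (Ne.symm n3)
       have b4 : (some "A4" == e3) = false := beq_eq_false_iff_ne.mpr (Ne.symm n4)
       have b5 : (some "A5" == e3) = false := beq_eq_false_iff_ne.mpr (Ne.symm n5)
       have b6 : (some "A6" == e3) = false := beq_eq_false_iff_ne.mpr (Ne.symm n6)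
       have b7 : (some "A7" == e3) = false := beq_eq_false_iff_ne.mpr (Ne.symm n7)
       have b8 : (some "A8" == e3) = false := beq_eq_false_iff_ne.mpr (Ne.symm n8)
       simp only [calcular_estrato_final_alt, rankedLabels, contains_ofList]
       simp [List.find?, List.contains, List.elem, b1, b2, b3, b4, b5, b6, b7, b8])

def nineOpts : List (Option String) :=
  [some "A1", some "A2", some "A3", some "A4", some "A5", some "A6", some "A7", some "A8", none]

lemma nrm_mem (e : Option String) : nrm e ∈ nineOpts := by
  rcases classify e with h|h|h|h|h|h|h|h|h
  all_goals first
    | (rw [h]; simp only [nrm]; norm_num [nineOpts])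
    | (obtain ⟨-, hn, -⟩ := h; rw [hn]; simp [nineOpts])

lemma main_concrete : ∀ a ∈ nineOpts, ∀ b ∈ nineOpts, ∀ c ∈ nineOpts,
    calcular_estrato_final a b c = calcular_estrato_final_alt a b c := by decide

-- ===== VERDICT (by name: the statement is the Claim_ definition above) =====
theorem calcular_estrato_final_spec : Claim_equal_calcular_estrato_final := by
  intro e1 e2 e3 _
  unfold Spec_calcular_estrato_final
  rw [A_nrm1, A_nrm2, A_nrm3, B_nrm1, B_nrm2, B_nrm3]
  exact main_concrete _ (nrm_mem e1) _ (nrm_mem e2) _ (nrm_mem e3)
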